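-- pv_equiv track=rewrite | github.com/Krypton3/SolveCraft | IBM_Preparation/arrayChallenge.py | calculate_counters_optimized
-- ===== SOURCE A (Python) =====
-- def calculate_counters_optimized(arr):
--     n = len(arr)
--     if n <= 1:
--         return [0]
--
--     # Initialize the result array and the sum of elements to the left
--     counters = [0] * n
--     sum_left = arr[0]  # To track the sum of all elements to the left of arr[i]
--
--     # Loop through each element starting from the second one
--     for i in range(1, n):
--         # Calculate the counter using the formula
--         counters[i] = arr[i] * i - sum_left
--
--         # After processing, update the sum of elements to the left for the
--         # next iteration
--         sum_left += arr[i]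
--
--     return counters
-- ===== SOURCE B (Python) =====
-- def calculate_counters_optimized(arr):
--     n = len(arr)
--     if n <= 1:
--         return [0]
--     # Naive definition: each counter is the sum of differences to every earlier element.
--     return [sum(arr[i] - arr[j] for j in range(i)) for i in range(n)]
-- ===== Notes on version B (the rewrite author's own statement) =====
-- stated objective: alternative
-- what changed: Replaces A's single pass with a running left-sum by a direct nested computation: each counter is the explicit sum of arr[i]-arr[j] over all j<i, built by a comprehension with no mutable accumulator.
import Mathlib
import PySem

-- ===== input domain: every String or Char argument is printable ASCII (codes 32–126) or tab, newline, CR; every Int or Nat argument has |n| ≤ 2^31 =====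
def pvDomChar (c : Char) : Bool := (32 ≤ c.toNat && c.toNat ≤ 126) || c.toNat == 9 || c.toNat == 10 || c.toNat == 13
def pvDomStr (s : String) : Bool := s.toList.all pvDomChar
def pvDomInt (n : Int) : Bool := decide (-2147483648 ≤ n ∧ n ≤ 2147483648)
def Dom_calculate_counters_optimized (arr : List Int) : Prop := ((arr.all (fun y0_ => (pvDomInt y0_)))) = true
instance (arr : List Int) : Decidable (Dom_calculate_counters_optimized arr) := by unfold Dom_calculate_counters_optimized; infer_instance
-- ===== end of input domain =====

-- B replaces A's single running-left-sum pass by the direct nested sum of arr[i]-arr[j] over all j<i (alternative decomposition, same return value).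

-- ===== PORT A =====
-- one pass, state (counters, sum_left); counters[i] = arr[i]*i - sum_left
def calculate_counters_optimized (arr : List Int) : List Int :=
  let n : Int := arr.length
  if n ≤ 1 then [0]
  else
    let counters : List Int := List.replicate arr.length 0
    let sum_left : Int := PySem.List.pyGetD arr 0 0
    let st := (PySem.List.pyRange 1 n 1).foldl
      (fun (st : List Int × Int) i =>
        (st.1.set i.toNat (PySem.List.pyGetD arr i 0 * i - st.2),
         st.2 + PySem.List.pyGetD arr i 0)) (counters, sum_left)
    st.1

-- ===== PORT B =====
-- comprehension: counter i is the inner sum over j in range(i) of arr[i]-arr[j]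
def calculate_counters_optimized_alt (arr : List Int) : List Int :=
  let n : Int := arr.length
  if n ≤ 1 then [0]
  else
    (PySem.List.pyRange 0 n 1).map (fun i =>
      (PySem.List.pyRange 0 i 1).foldl
        (fun s j => s + (PySem.List.pyGetD arr i 0 - PySem.List.pyGetD arr j 0)) 0)

-- ===== PRECONDITION & SPEC =====
def Spec_calculate_counters_optimized (arr : List Int) (out : List Int) : Prop := out = calculate_counters_optimized_alt arr
instance (arr : List Int) (out : List Int) : Decidable (Spec_calculate_counters_optimized arr out) := by unfold Spec_calculate_counters_optimized; infer_instance

-- ===== CLAIM (what is proved, stated in full; the proofs are below) =====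
def Claim_equal_calculate_counters_optimized : Prop := ∀ (arr : List Int), Dom_calculate_counters_optimized arr → Spec_calculate_counters_optimized arr (calculate_counters_optimized arr)

-- ===== LEMMAS AND PROOFS =====

-- the closed form both ports compute at position k: arr[k]*k - sum(arr[:k])
def pvG (arr : List Int) (k : Nat) : Int := arr.getD k 0 * k - (arr.take k).sum

theorem pv_sum_take_succ (arr : List Int) (m : Nat) (hm : m < arr.length) :
    (arr.take (m+1)).sum = (arr.take m).sum + arr.getD m 0 := by
  rw [List.take_add_one, List.sum_append, List.getD_eq_getElem _ _ hm]
  simp [List.getElem?_eq_getElem hm]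

theorem pv_pyGetD_nat (arr : List Int) (m : Nat) :
    PySem.List.pyGetD arr (m : Int) 0 = arr.getD m 0 := by
  simp [PySem.List.pyGetD_natCast]

-- B's inner foldl computes the closed form
theorem pv_inner (arr : List Int) (a : Int) (m : Nat) (hm : m ≤ arr.length) :
    (PySem.List.pyRange 0 (m : Int) 1).foldl
      (fun s j => s + (a - PySem.List.pyGetD arr j 0)) 0
    = a * m - (arr.take m).sum := by
  induction m with
  | zero => simp
  | succ m ih =>
    have hm' : m < arr.length := hm
    have hsplit : PySem.List.pyRange 0 (((m:Int)) + 1) 1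
        = PySem.List.pyRange 0 (m : Int) 1 ++ [(m : Int)] :=
      PySem.List.pyRange_one_succ_right (by positivity)
    push_cast
    rw [hsplit, List.foldl_append, ih (Nat.le_of_lt hm'),
        pv_sum_take_succ arr m hm']
    simp only [List.foldl_cons, List.foldl_nil, pv_pyGetD_nat]
    ring

theorem pv_B_eq (arr : List Int) (h : ¬ ((arr.length : Int) ≤ 1)) :
    calculate_counters_optimized_alt arr = (List.range arr.length).map (pvG arr) := by
  unfold calculate_counters_optimized_alt
  simp only [if_neg h]
  rw [show ((arr.length : Int)) = ((arr.length : Nat) : Int) from rfl,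
      PySem.List.pyRange_zero_nat, List.map_map]
  refine List.map_congr_left ?_
  intro k hk
  have hk' : k < arr.length := List.mem_range.mp hk
  simp only [Function.comp]
  rw [pv_inner arr _ k (Nat.le_of_lt hk'), pv_pyGetD_nat]
  rfl

theorem pv_set_step (arr : List Int) (m : Nat) (_hm : m < arr.length) :
    (((List.range arr.length).map (fun k => if k < m then pvG arr k else 0)).set m (pvG arr m))
    = (List.range arr.length).map (fun k => if k < m + 1 then pvG arr k else 0) := by
  apply List.ext_getElem
  · simp
  · intro i h1 h2
    simp only [List.length_set, List.length_map, List.length_range] at h1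
    rw [List.getElem_set]
    by_cases hi : m = i
    · subst hi
      simp
    · simp only [if_neg hi, List.getElem_map, List.getElem_range]
      have : (i < m) = (i < m + 1) := by
        apply propext; omega
      simp only [this]

-- A's loop invariant: after range(1, m), counters holds pvG below m and sum_left = sum(arr[:m])
theorem pv_A_loop (arr : List Int) (m : Nat) (h1 : 1 ≤ m) (hm : m ≤ arr.length) :
    (PySem.List.pyRange 1 (m : Int) 1).foldl
      (fun (st : List Int × Int) i =>
        (st.1.set i.toNat (PySem.List.pyGetD arr i 0 * i - st.2),
         st.2 + PySem.List.pyGetD arr i 0))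
      (List.replicate arr.length 0, PySem.List.pyGetD arr 0 0)
    = ((List.range arr.length).map (fun k => if k < m then pvG arr k else 0),
       (arr.take m).sum) := by
  induction m with
  | zero => omega
  | succ m ih =>
    by_cases hm1 : m = 0
    · subst hm1
      rw [show (((0:Nat) + 1 : Nat) : Int) = 1 by norm_num,
          PySem.List.pyRange_one_eq_nil (le_refl 1)]
      have hlen : 0 < arr.length := by omega
      simp only [List.foldl_nil, Prod.mk.injEq]
      constructor
      · apply List.ext_getElem
        · simp
        · intro i hA hB
          simp only [List.getElem_replicate, List.getElem_map, List.getElem_range]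
          split
          · next hi =>
            have : i = 0 := by omega
            subst this
            simp [pvG]
          · rfl
      · rw [pv_sum_take_succ arr 0 hlen]
        simp [PySem.List.pyGetD, PySem.List.pyGet?, PySem.List.pyIdx?, List.getD, hlen]
    · have h1m : 1 ≤ m := by omega
      have hm' : m < arr.length := by omega
      have hsplit : PySem.List.pyRange 1 ((m:Int) + 1) 1
          = PySem.List.pyRange 1 (m : Int) 1 ++ [(m : Int)] :=
        PySem.List.pyRange_one_succ_right (by exact_mod_cast h1m)
      push_cast
      rw [hsplit, List.foldl_append, ih h1m (Nat.le_of_lt hm')]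
      simp only [List.foldl_cons, List.foldl_nil, pv_pyGetD_nat, Int.toNat_natCast,
        Prod.mk.injEq]
      constructor
      · have : arr.getD m 0 * (m:Int) - (arr.take m).sum = pvG arr m := rfl
        rw [this, pv_set_step arr m hm']
      · rw [pv_sum_take_succ arr m hm']

-- ===== VERDICT (by name: the statement is the Claim_ definition above) =====
theorem calculate_counters_optimized_spec : Claim_equal_calculate_counters_optimized := by
  intro arr _
  unfold Spec_calculate_counters_optimized
  by_cases h : (arr.length : Int) ≤ 1
  · unfold calculate_counters_optimized calculate_counters_optimized_alt
    simp only [if_pos h]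
  · have hlen : 1 ≤ arr.length := by omega
    rw [pv_B_eq arr h]
    unfold calculate_counters_optimized
    simp only [if_neg h]
    rw [pv_A_loop arr arr.length hlen le_rfl]
    refine List.map_congr_left ?_
    intro k hk
    simp [List.mem_range.mp hk]
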